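-- pv_equiv track=rewrite | github.com/shared-goals/audio-transcribe | verify_diarize.py | count_speaker_transitions
-- ===== SOURCE A (Python) =====
-- from typing import Any
--
-- def count_speaker_transitions(segments: list[dict[str, Any]]) -> int:
--     """Count speaker changes between consecutive segments (skipping UNKNOWN)."""
--     transitions = 0
--     prev_speaker: str | None = None
--     for seg in segments:
--         speaker = seg.get("speaker", "UNKNOWN")
--         if speaker == "UNKNOWN":
--             continue
--         if prev_speaker is not None and speaker != prev_speaker:
--             transitions += 1
--         prev_speaker = speaker
--     return transitions
-- ===== SOURCE B (Python) =====
-- def count_speaker_transitions(segments: list[dict[str, object]]) -> int: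
--     """Count speaker changes between consecutive segments (skipping UNKNOWN)."""
--     speakers = [s for s in (seg.get("speaker", "UNKNOWN") for seg in segments)
--                 if s != "UNKNOWN"]
--
--     def transitions_between(lo: int, hi: int) -> int:
--         # transitions inside speakers[lo:hi], by divide and conquer:
--         # split at the midpoint, recurse on each half, add the one
--         # boundary comparison that the split cuts through.
--         if hi - lo <= 1:
--             return 0
--         mid = (lo + hi) // 2
--         return (transitions_between(lo, mid)
--                 + transitions_between(mid, hi)
--                 + (1 if speakers[mid - 1] != speakers[mid] else 0))
--
--     return transitions_between(0, len(speakers))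
-- ===== Notes on version B (the rewrite author's own statement) =====
-- stated objective: alternative
-- what changed: Replaced A's fused single pass carrying prev_speaker/transitions state by a filter pass producing the non-UNKNOWN speaker list followed by a divide-and-conquer recursion that halves the index range, recurses on both halves and adds the single boundary comparison cut by the split.
import Mathlib
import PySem

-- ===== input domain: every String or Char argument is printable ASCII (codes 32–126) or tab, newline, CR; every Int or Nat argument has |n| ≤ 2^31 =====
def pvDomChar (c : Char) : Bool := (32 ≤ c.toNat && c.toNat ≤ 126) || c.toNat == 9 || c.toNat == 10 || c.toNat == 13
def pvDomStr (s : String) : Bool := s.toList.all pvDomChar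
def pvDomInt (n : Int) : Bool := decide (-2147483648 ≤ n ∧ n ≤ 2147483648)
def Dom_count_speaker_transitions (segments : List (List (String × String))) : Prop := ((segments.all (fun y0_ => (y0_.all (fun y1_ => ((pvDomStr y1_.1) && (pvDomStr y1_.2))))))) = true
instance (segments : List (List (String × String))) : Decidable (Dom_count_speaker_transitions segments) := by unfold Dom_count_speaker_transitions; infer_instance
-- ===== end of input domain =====

-- B replaces A's fused single pass with prev-speaker state by a filter pass plus a
-- divide-and-conquer recursion over the filtered index range (objective: alternative).

-- ===== PORT A =====
-- A's loop body: given (transitions, prev_speaker) and a segment, apply one iteration.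
def pvAStep (st : Int × Option String) (seg : List (String × String)) : Int × Option String :=
  let speaker := (PySem.Dict.mk seg).getD "speaker" "UNKNOWN"
  if speaker == "UNKNOWN" then st
  else
    (match st.2 with
      | some p => if speaker ≠ p then st.1 + 1 else st.1
      | none => st.1,
     some speaker)

def count_speaker_transitions (segments : List (List (String × String))) : Int :=
  (segments.foldl pvAStep (0, none)).1

-- ===== PORT B =====
-- B's comprehension filter: the segment's speaker label, or none if it is "UNKNOWN".
def pvBKeep (seg : List (String × String)) : Option String :=
  let s := (PySem.Dict.mk seg).getD "speaker" "UNKNOWN"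
  if s == "UNKNOWN" then none else some s

-- B's inner divide-and-conquer: transitions inside speakers[lo:hi].  Indices are
-- nonnegative and in range on every call B makes, so List.getD is exact here.
def pvDC (speakers : List String) (lo hi : Nat) : Int :=
  if hi - lo ≤ 1 then 0
  else
    pvDC speakers lo ((lo + hi) / 2) + pvDC speakers ((lo + hi) / 2) hi +
      (if speakers.getD ((lo + hi) / 2 - 1) "" ≠ speakers.getD ((lo + hi) / 2) "" then 1 else 0)
termination_by hi - lo
decreasing_by all_goals omega

def count_speaker_transitions_alt (segments : List (List (String × String))) : Int :=
  let speakers := segments.filterMap pvBKeep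
  pvDC speakers 0 speakers.length

-- ===== PRECONDITION & SPEC =====
def Spec_count_speaker_transitions (segments : List (List (String × String))) (out : Int) : Prop := out = count_speaker_transitions_alt segments
instance (segments : List (List (String × String))) (out : Int) : Decidable (Spec_count_speaker_transitions segments out) := by unfold Spec_count_speaker_transitions; infer_instance

-- ===== CLAIM (what is proved, stated in full; the proofs are below) =====
def Claim_equal_count_speaker_transitions : Prop := ∀ (segments : List (List (String × String))), Dom_count_speaker_transitions segments → Spec_count_speaker_transitions segments (count_speaker_transitions segments)

-- ===== LEMMAS AND PROOFS =====

-- Reference count: number of adjacent differing pairs in a speaker list.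
def pvCountAdj : List String → Int
  | a :: b :: rest => (if a ≠ b then 1 else 0) + pvCountAdj (b :: rest)
  | _ => 0

theorem pvCountAdj_short (xs : List String) (h : xs.length ≤ 1) : pvCountAdj xs = 0 := by
  match xs with
  | [] => rfl
  | [a] => rfl
  | a :: b :: r => simp at h

-- Splitting lemma: the count of a concatenation is the two counts plus the boundary pair.
theorem pvCountAdj_append (xs ys : List String) :
    pvCountAdj (xs ++ ys) = pvCountAdj xs + pvCountAdj ys +
      (match xs.getLast?, ys.head? with
        | some a, some z => if a ≠ z then 1 else 0
        | _, _ => 0) := by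
  induction xs with
  | nil => cases ys <;> simp [pvCountAdj]
  | cons a t ih =>
    cases t with
    | nil =>
      cases ys with
      | nil => simp [pvCountAdj]
      | cons z zs => simp [pvCountAdj]; ring
    | cons b t' =>
      have : pvCountAdj (a :: b :: (t' ++ ys))
          = (if a ≠ b then 1 else 0) + pvCountAdj ((b :: t') ++ ys) := by
        simp [pvCountAdj]
      simp only [List.cons_append] at this ih ⊢
      rw [this, ih]
      have hl : (a :: b :: t').getLast? = (b :: t').getLast? := by
        simp [List.getLast?_cons_cons]
      rw [hl]
      have : pvCountAdj (a :: b :: t') = (if a ≠ b then 1 else 0) + pvCountAdj (b :: t') := by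
        simp [pvCountAdj]
      rw [this]; ring

-- A's loop invariant (fold state vs count of prev-label ++ remaining filtered labels).
theorem pv_fold_inv (segments : List (List (String × String))) (t : Int) (prev : Option String) :
    (segments.foldl pvAStep (t, prev)).1
      = t + pvCountAdj (prev.toList ++ segments.filterMap pvBKeep) := by
  induction segments generalizing t prev with
  | nil => cases prev <;> simp [pvCountAdj]
  | cons seg rest ih =>
    rw [List.foldl_cons, List.filterMap_cons]
    by_cases h : (PySem.Dict.mk seg).getD "speaker" "UNKNOWN" = "UNKNOWN"
    · have hs : pvAStep (t, prev) seg = (t, prev) := by simp [pvAStep, h]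
      have hb : pvBKeep seg = none := by simp [pvBKeep, h]
      rw [hs, hb, ih]
    · have hb : pvBKeep seg = some ((PySem.Dict.mk seg).getD "speaker" "UNKNOWN") := by
        simp [pvBKeep, h]
      cases prev with
      | none =>
        have hs : pvAStep (t, none) seg =
            (t, some ((PySem.Dict.mk seg).getD "speaker" "UNKNOWN")) := by
          simp [pvAStep, h]
        rw [hs, hb, ih]
        simp
      | some p =>
        by_cases hp : (PySem.Dict.mk seg).getD "speaker" "UNKNOWN" = p
        · have hs : pvAStep (t, some p) seg =
              (t, some ((PySem.Dict.mk seg).getD "speaker" "UNKNOWN")) := by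
            simp [pvAStep, hp]
          rw [hs, hb, ih]
          simp [hp, pvCountAdj]
        · have hs : pvAStep (t, some p) seg =
              (t + 1, some ((PySem.Dict.mk seg).getD "speaker" "UNKNOWN")) := by
            simp [pvAStep, h, hp]
          rw [hs, hb, ih]
          simp only [Option.toList, List.cons_append, List.nil_append]
          rw [pvCountAdj]
          rw [if_pos (fun hq => hp (Eq.symm hq))]
          ring

-- B's divide-and-conquer computes the adjacent-difference count of the slice [lo:hi].
theorem pvDC_eq (l : List String) : ∀ (n lo hi : Nat), hi - lo = n → hi ≤ l.length →
    pvDC l lo hi = pvCountAdj ((l.drop lo).take (hi - lo)) := by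
  intro n
  induction n using Nat.strong_induction_on with
  | _ n ih =>
    intro lo hi hn hlen
    rw [pvDC]
    by_cases hsmall : hi - lo ≤ 1
    · rw [if_pos hsmall,
        pvCountAdj_short ((l.drop lo).take (hi - lo)) (by simp; omega)]
    · rw [if_neg hsmall]
      have hmid1 : lo < (lo + hi) / 2 := by omega
      have hmid2 : (lo + hi) / 2 < hi := by omega
      set mid := (lo + hi) / 2 with hm
      have hL := ih (mid - lo) (by omega) lo mid rfl (le_trans (le_of_lt hmid2) hlen)
      have hR := ih (hi - mid) (by omega) mid hi rfl hlen
      have hsplit : (l.drop lo).take (hi - lo)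
          = (l.drop lo).take (mid - lo) ++ (l.drop mid).take (hi - mid) := by
        have : hi - lo = (mid - lo) + (hi - mid) := by omega
        rw [this, List.take_add, List.drop_drop, Nat.add_sub_cancel' (le_of_lt hmid1)]
      have hlast : ((l.drop lo).take (mid - lo)).getLast? = l[mid - 1]? := by
        rw [List.getLast?_eq_getElem?]
        have hlen' : ((l.drop lo).take (mid - lo)).length = mid - lo := by
          simp; omega
        rw [hlen']
        rw [List.getElem?_take_of_lt (by omega), List.getElem?_drop]
        congr 1
        omega
      have hhead : ((l.drop mid).take (hi - mid)).head? = l[mid]? := by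
        rw [List.head?_eq_getElem?]
        rw [List.getElem?_take_of_lt (by omega), List.getElem?_drop]
        simp
      have hm1 : l[mid - 1]? = some (l.getD (mid - 1) "") := by
        rw [List.getD_eq_getElem?_getD]
        cases hq : l[mid - 1]? with
        | none => exact absurd (List.getElem?_eq_none_iff.mp hq) (by omega)
        | some v => rfl
      have hm2 : l[mid]? = some (l.getD mid "") := by
        rw [List.getD_eq_getElem?_getD]
        cases hq : l[mid]? with
        | none => exact absurd (List.getElem?_eq_none_iff.mp hq) (by omega)
        | some v => rfl
      rw [hsplit, pvCountAdj_append, hlast, hhead, hm1, hm2, hL, hR]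

-- ===== VERDICT (by name: the statement is the Claim_ definition above) =====
theorem count_speaker_transitions_spec : Claim_equal_count_speaker_transitions := by
  intro segments _
  unfold Spec_count_speaker_transitions count_speaker_transitions count_speaker_transitions_alt
  rw [pvDC_eq _ _ 0 _ rfl (le_refl _)]
  simpa using pv_fold_inv segments 0 none
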